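-- pv_equiv track=rewrite | github.com/xabirizar9/liveportrait-tokenizer | src/tokenizer_module.py | _calculate_fsq_ranges
-- ===== SOURCE A (Python) =====
-- def _calculate_fsq_ranges(fsq_configs):
--     ranges = {}
--     current_start = 0
--
--     for fsq_name, (L, D) in fsq_configs.items():
--         codebook_size = L ** D
--         end_idx = current_start + codebook_size
--         ranges[fsq_name] = (current_start, end_idx)
--         current_start = end_idx
--
--     return ranges
-- ===== SOURCE B (Python) =====
-- def _calculate_fsq_ranges(fsq_configs):
--     # each range is computed independently from prefix sums of the sizes table:
--     # start_i = sum of all earlier codebook sizes, end_i = sum up to and including i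
--     items = list(fsq_configs.items())
--     sizes = [L ** D for _, (L, D) in items]
--     return {name: (sum(sizes[:i]), sum(sizes[:i + 1]))
--             for i, (name, _) in enumerate(items)}
-- ===== Notes on version B (the rewrite author's own statement) =====
-- stated objective: alternative
-- what changed: Replaces A's single accumulator-threading loop (current_start carried across iterations while inserting into a dict) with an index-based formulation that computes every range independently: a sizes table plus per-key prefix sums over slices (start_i = sum(sizes[:i]), end_i = sum(sizes[:i+1])), trading O(n) for O(n^2) but removing all cross-iteration state.
-- outside the precondition, e.g. on _calculate_fsq_ranges({'a': (2, -1)}): A returns {'a': (0, 0.5)}, B returns {'a': (0, 0.5)}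
import Mathlib
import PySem

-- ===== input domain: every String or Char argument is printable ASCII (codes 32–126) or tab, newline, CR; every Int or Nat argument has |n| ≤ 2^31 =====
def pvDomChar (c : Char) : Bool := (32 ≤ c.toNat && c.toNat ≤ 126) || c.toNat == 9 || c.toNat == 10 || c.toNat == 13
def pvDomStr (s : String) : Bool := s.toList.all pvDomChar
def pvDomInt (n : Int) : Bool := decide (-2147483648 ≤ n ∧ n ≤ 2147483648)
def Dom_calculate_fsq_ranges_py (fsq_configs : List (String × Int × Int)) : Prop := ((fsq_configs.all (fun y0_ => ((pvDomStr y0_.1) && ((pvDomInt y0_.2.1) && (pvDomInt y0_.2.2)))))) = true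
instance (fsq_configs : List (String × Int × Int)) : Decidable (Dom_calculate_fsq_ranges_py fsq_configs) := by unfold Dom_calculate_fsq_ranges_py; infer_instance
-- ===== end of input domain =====

-- B replaces A's accumulator-threading loop by an index-based formulation: each range is computed
-- independently as prefix sums over a sizes table (start_i = sum(sizes[:i]), end_i = sum(sizes[:i+1]));
-- a genuinely different, stateless decomposition (quadratic rather than linear).


-- ===== PORT A =====
-- literal port of A: one loop over the dict items, threading the ranges dict and current_start
def calculate_fsq_ranges_py (fsq_configs : List (String × Int × Int)) : List (String × Int × Int) :=
  let st := fsq_configs.foldl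
    (fun (st : PySem.Dict String (Int × Int) × Int) c =>
      let codebook_size : Int := c.2.1 ^ c.2.2.toNat   -- L ** D (Pre_ guarantees 0 ≤ D)
      let end_idx : Int := st.2 + codebook_size
      (st.1.insert c.1 (st.2, end_idx), end_idx))
    (PySem.Dict.empty, 0)
  st.1.items

-- ===== PORT B =====
-- port of B: sizes table, then for every enumerated item its range independently
-- as (sum(sizes[:i]), sum(sizes[:i+1]))
def calculate_fsq_ranges_py_alt (fsq_configs : List (String × Int × Int)) : List (String × Int × Int) :=
  let sizes : List Int := fsq_configs.map (fun c => c.2.1 ^ c.2.2.toNat)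
  (PySem.List.enumerate fsq_configs 0).map (fun ic =>
    (ic.2.1, (PySem.List.slice sizes none (some ic.1)).sum,
             (PySem.List.slice sizes none (some (ic.1 + 1))).sum))

-- ===== PRECONDITION & SPEC =====
-- Pre_ excludes (i) negative exponents D, where Python's L ** D returns a float (not an int) or
-- raises ZeroDivisionError for L = 0, and (ii) duplicate names, which cannot occur in A's actual
-- dict argument and are an artifact of the association-list representation.
def Pre_calculate_fsq_ranges_py (fsq_configs : List (String × Int × Int)) : Prop :=
  (fsq_configs.map Prod.fst).Nodup ∧ ∀ c ∈ fsq_configs, 0 ≤ c.2.2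
instance (fsq_configs : List (String × Int × Int)) : Decidable (Pre_calculate_fsq_ranges_py fsq_configs) := by unfold Pre_calculate_fsq_ranges_py; infer_instance
def pvWitness_calculate_fsq_ranges_py : (List (String × Int × Int)) := [("exp", 5, 3), ("pose", 3, 2)]
def Spec_calculate_fsq_ranges_py (fsq_configs : List (String × Int × Int)) (out : List (String × Int × Int)) : Prop := out = calculate_fsq_ranges_py_alt fsq_configs
instance (fsq_configs : List (String × Int × Int)) (out : List (String × Int × Int)) : Decidable (Spec_calculate_fsq_ranges_py fsq_configs out) := by unfold Spec_calculate_fsq_ranges_py; infer_instance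

-- ===== CLAIM (what is proved, stated in full; the proofs are below) =====
def Claim_equal_calculate_fsq_ranges_py : Prop := ∀ (fsq_configs : List (String × Int × Int)), Dom_calculate_fsq_ranges_py fsq_configs → Pre_calculate_fsq_ranges_py fsq_configs → Spec_calculate_fsq_ranges_py fsq_configs (calculate_fsq_ranges_py fsq_configs)

-- ===== LEMMAS AND PROOFS =====

-- reference result: the (name, start, end) triples starting at offset s
def pvRef (s : Int) : List (String × Int × Int) → List (String × Int × Int)
  | [] => []
  | c :: rest => (c.1, s, s + c.2.1 ^ c.2.2.toNat) :: pvRef (s + c.2.1 ^ c.2.2.toNat) rest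

lemma length_pvRef (s : Int) (cfgs : List (String × Int × Int)) :
    (pvRef s cfgs).length = cfgs.length := by
  induction cfgs generalizing s with
  | nil => rfl
  | cons c rest ih => simp [pvRef, ih]

-- the k-th entry of pvRef is determined by prefix sums of the sizes
lemma pvRef_getElem (cfgs : List (String × Int × Int)) (s : Int) (k : Nat)
    (hk : k < cfgs.length) :
    (pvRef s cfgs)[k]'(by rw [length_pvRef]; exact hk) =
      ((cfgs[k]).1,
       s + ((cfgs.map (fun c => c.2.1 ^ c.2.2.toNat)).take k).sum,
       s + ((cfgs.map (fun c => c.2.1 ^ c.2.2.toNat)).take (k + 1)).sum) := by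
  induction cfgs generalizing s k with
  | nil => simp at hk
  | cons c rest ih =>
    cases k with
    | zero => simp [pvRef]
    | succ k =>
      simp only [pvRef, List.getElem_cons_succ, List.map_cons, List.take_succ_cons,
        List.sum_cons]
      rw [ih (s + c.2.1 ^ c.2.2.toNat) k (by simpa using hk)]
      ring_nf

lemma foldA_items (cfgs : List (String × Int × Int)) (d : PySem.Dict String (Int × Int)) (s : Int)
    (hfresh : ∀ c ∈ cfgs, d.contains c.1 = false) (hnd : (cfgs.map Prod.fst).Nodup) :
    (cfgs.foldl
      (fun (st : PySem.Dict String (Int × Int) × Int) c =>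
        (st.1.insert c.1 (st.2, st.2 + c.2.1 ^ c.2.2.toNat), st.2 + c.2.1 ^ c.2.2.toNat))
      (d, s)).1.items = d.items ++ pvRef s cfgs := by
  induction cfgs generalizing d s with
  | nil => simp [pvRef]
  | cons c rest ih =>
    simp only [List.foldl_cons, pvRef]
    rw [ih]
    · rw [PySem.Dict.items_insert_of_not_contains _ _ (hfresh c (by simp))]
      simp
    · intro c' hc'
      rw [PySem.Dict.contains_insert]
      have hne : c'.1 ≠ c.1 := by
        simp only [List.map_cons, List.nodup_cons] at hnd
        exact fun h => hnd.1 (h ▸ List.mem_map_of_mem hc')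
      simp [hne, hfresh c' (List.mem_cons_of_mem _ hc')]
    · simp only [List.map_cons, List.nodup_cons] at hnd
      exact hnd.2

lemma alt_eq_ref (cfgs : List (String × Int × Int)) :
    calculate_fsq_ranges_py_alt cfgs = pvRef 0 cfgs := by
  unfold calculate_fsq_ranges_py_alt
  apply List.ext_getElem
  · simp [length_pvRef, PySem.List.length_enumerate]
  · intro k h1 h2
    rw [pvRef_getElem cfgs 0 k (by rwa [length_pvRef] at h2)]
    simp only [List.getElem_map, PySem.List.getElem_enumerate]
    have h1' : ((0 : Int) + (k : Int) + 1) = (((k + 1 : Nat)) : Int) := by push_cast; ring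
    rw [h1', show ((0 : Int) + (k : Int)) = ((k : Nat) : Int) by push_cast; ring,
        PySem.List.slice_to_natCast, PySem.List.slice_to_natCast]
    simp

lemma a_eq_ref (cfgs : List (String × Int × Int)) (hnd : (cfgs.map Prod.fst).Nodup) :
    calculate_fsq_ranges_py cfgs = pvRef 0 cfgs := by
  show (cfgs.foldl
      (fun (st : PySem.Dict String (Int × Int) × Int) c =>
        (st.1.insert c.1 (st.2, st.2 + c.2.1 ^ c.2.2.toNat), st.2 + c.2.1 ^ c.2.2.toNat))
      (PySem.Dict.empty, 0)).1.items = pvRef 0 cfgs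
  rw [foldA_items cfgs PySem.Dict.empty 0 (fun c _ => PySem.Dict.contains_empty c.1) hnd]
  simp [PySem.Dict.empty]

-- ===== VERDICT (by name: the statement is the Claim_ definition above) =====
theorem calculate_fsq_ranges_py_spec : Claim_equal_calculate_fsq_ranges_py := by
  intro cfgs _ hpre
  unfold Spec_calculate_fsq_ranges_py
  rw [a_eq_ref cfgs hpre.1, alt_eq_ref cfgs]
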